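-- pv_equiv track=rewrite | github.com/Hussain0327/Scaling-law-research | src/seal/policy.py | _parse_stdout
-- ===== SOURCE A (Python) =====
-- class PolicyGenerationError(RuntimeError):
--     """Raised when the policy model fails to produce a completion."""
--
-- def _parse_stdout(stdout: str) -> str:
--     """
--     Handle legacy CLI output which prints banners delimited by ``==========``.
--     """
--
--     if not stdout:
--         raise PolicyGenerationError("mlx_lm.generate produced no output.")
--
--     segments = []
--     capture = False
--     for line in stdout.splitlines():
--         if line.strip() == "==========":
--             capture = not capture
--             continue
--         if capture:
--             segments.append(line.rstrip())
--
--     if segments: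
--         return "\n".join(segments).strip()
--
--     # As a last resort return stdout itself.
--     return stdout.strip()
-- ===== SOURCE B (Python) =====
-- class PolicyGenerationError(RuntimeError):
--     """Raised when the policy model fails to produce a completion."""
--
-- def _parse_stdout(stdout: str) -> str:
--     if not stdout:
--         raise PolicyGenerationError("mlx_lm.generate produced no output.")
--     # Partition the lines into groups separated by banner-delimiter lines,
--     # then keep the odd-indexed groups (the regions "between" the banners).
--     groups = []
--     current = []
--     for line in stdout.splitlines():
--         if line.strip() == "==========":
--             groups.append(current)
--             current = []
--         else:
--             current.append(line)
--     groups.append(current)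
--     captured = [line.rstrip() for i, g in enumerate(groups) if i % 2 == 1 for line in g]
--     if captured:
--         return "\n".join(captured).strip()
--     return stdout.strip()
-- ===== Notes on version B (the rewrite author's own statement) =====
-- stated objective: alternative
-- what changed: Replaces A's single-pass capture-flag state machine with a partition-then-select decomposition: split the lines into groups at the banner-delimiter lines, then flatten the rstripped lines of the odd-indexed groups.
import Mathlib
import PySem

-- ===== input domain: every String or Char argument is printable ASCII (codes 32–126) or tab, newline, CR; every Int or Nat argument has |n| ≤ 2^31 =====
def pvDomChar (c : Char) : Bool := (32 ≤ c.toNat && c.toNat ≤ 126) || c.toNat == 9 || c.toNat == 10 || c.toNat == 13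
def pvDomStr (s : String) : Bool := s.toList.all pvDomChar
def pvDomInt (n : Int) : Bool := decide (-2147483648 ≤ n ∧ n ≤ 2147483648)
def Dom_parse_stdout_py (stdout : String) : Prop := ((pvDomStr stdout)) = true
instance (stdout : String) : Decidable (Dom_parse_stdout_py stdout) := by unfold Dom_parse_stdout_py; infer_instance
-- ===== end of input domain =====

-- B replaces A's capture-flag state machine by partitioning the lines at the banner
-- delimiters into groups and flattening the odd-indexed groups (objective: alternative).

-- ===== PORT A =====
-- single pass with a capture flag, collecting rstripped lines while capturing
def parse_stdout_py (stdout : String) : String :=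
  let st := (PySem.Str.splitlines stdout).foldl
    (fun (acc : List String × Bool) line =>
      if PySem.Str.strip line = "==========" then (acc.1, !acc.2)
      else if acc.2 then (acc.1 ++ [PySem.Str.rstrip line], acc.2)
      else acc) ([], false)
  if st.1 ≠ [] then
    PySem.Str.strip (PySem.Str.join "\n" st.1)
  else
    PySem.Str.strip stdout

-- ===== PORT B =====
-- partition lines at delimiter lines into groups, then flatten odd-indexed groups
def parse_stdout_py_alt (stdout : String) : String :=
  let st := (PySem.Str.splitlines stdout).foldl
    (fun (acc : List (List String) × List String) line =>
      if PySem.Str.strip line = "==========" then (acc.1 ++ [acc.2], [])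
      else (acc.1, acc.2 ++ [line])) ([], [])
  let groups := st.1 ++ [st.2]
  let captured := (PySem.List.enumerate groups 0).flatMap
    (fun p => if p.1 % 2 == 1 then p.2.map PySem.Str.rstrip else [])
  if captured ≠ [] then
    PySem.Str.strip (PySem.Str.join "\n" captured)
  else
    PySem.Str.strip stdout

-- ===== PRECONDITION & SPEC =====
-- A raises PolicyGenerationError on empty stdout; Pre_ excludes exactly that input.
def Pre_parse_stdout_py (stdout : String) : Prop := stdout ≠ ""
instance (stdout : String) : Decidable (Pre_parse_stdout_py stdout) := by
  unfold Pre_parse_stdout_py; infer_instance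
def pvWitness_parse_stdout_py : String := "==========\nhello \n=========="

def Spec_parse_stdout_py (stdout : String) (out : String) : Prop := out = parse_stdout_py_alt stdout
instance (stdout : String) (out : String) : Decidable (Spec_parse_stdout_py stdout out) := by
  unfold Spec_parse_stdout_py; infer_instance

-- ===== CLAIM (what is proved, stated in full; the proofs are below) =====
def Claim_equal_parse_stdout_py : Prop := ∀ (stdout : String), Dom_parse_stdout_py stdout → Pre_parse_stdout_py stdout → Spec_parse_stdout_py stdout (parse_stdout_py stdout)

-- ===== LEMMAS AND PROOFS =====

-- the selection B performs on a finished group list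
def pvSel (gs : List (List String)) : List String :=
  (PySem.List.enumerate gs 0).flatMap
    (fun p => if p.1 % 2 == 1 then p.2.map PySem.Str.rstrip else [])

lemma pvSel_snoc (gs : List (List String)) (c : List String) :
    pvSel (gs ++ [c]) =
      pvSel gs ++ (if gs.length % 2 = 1 then c.map PySem.Str.rstrip else []) := by
  unfold pvSel
  rw [PySem.List.enumerate_append, List.flatMap_append]
  have he : PySem.List.enumerate [c] (0 + (gs.length : Int)) = [((0 : Int) + gs.length, c)] := by
    simp [PySem.List.enumerate]
  rw [he]
  simp only [List.flatMap_cons, List.flatMap_nil, List.append_nil]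
  congr 1
  by_cases h : gs.length % 2 = 1
  · have hb : (((0 : Int) + gs.length) % 2 == 1) = true := by
      simp only [beq_iff_eq]; omega
    rw [hb, if_pos rfl, if_pos h]
  · have hb : (((0 : Int) + gs.length) % 2 == 1) = false := by
      simp only [beq_eq_false_iff_ne, ne_eq]; omega
    rw [hb, if_neg (by simp), if_neg h]

-- invariant linking A's fold state to B's fold state
lemma pv_inv (ls : List String) (segs : List String) (cap : Bool)
    (gs : List (List String)) (cur : List String)
    (hcap : cap = decide (gs.length % 2 = 1))
    (hseg : segs = pvSel gs ++ (if cap then cur.map PySem.Str.rstrip else [])) :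
    (ls.foldl (fun (acc : List String × Bool) line =>
        if PySem.Str.strip line = "==========" then (acc.1, !acc.2)
        else if acc.2 then (acc.1 ++ [PySem.Str.rstrip line], acc.2)
        else acc) (segs, cap)).1 =
    pvSel ((ls.foldl (fun (acc : List (List String) × List String) line =>
        if PySem.Str.strip line = "==========" then (acc.1 ++ [acc.2], [])
        else (acc.1, acc.2 ++ [line])) (gs, cur)).1 ++
      [(ls.foldl (fun (acc : List (List String) × List String) line =>
        if PySem.Str.strip line = "==========" then (acc.1 ++ [acc.2], [])
        else (acc.1, acc.2 ++ [line])) (gs, cur)).2]) := by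
  induction ls generalizing segs cap gs cur with
  | nil =>
      simp only [List.foldl_nil]
      rw [pvSel_snoc, hseg, hcap]
      by_cases h : gs.length % 2 = 1 <;> simp [h]
  | cons l ls ih =>
      simp only [List.foldl_cons]
      by_cases hd : PySem.Str.strip l = "=========="
      · rw [if_pos hd, if_pos hd]
        apply ih
        · rw [hcap]
          simp only [List.length_append, List.length_cons, List.length_nil]
          by_cases h : gs.length % 2 = 1 <;> simp [h] <;> omega
        · rw [pvSel_snoc, hseg, hcap]
          by_cases h : gs.length % 2 = 1 <;> simp [h]
      · rw [if_neg hd, if_neg hd]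
        cases cap with
        | true =>
            rw [if_pos rfl]
            apply ih _ _ _ _ hcap
            rw [hseg]
            simp [List.map_append]
        | false =>
            rw [if_neg (by simp)]
            apply ih _ _ _ _ hcap
            rw [hseg]
            simp

-- ===== VERDICT (by name: the statement is the Claim_ definition above) =====
theorem parse_stdout_py_spec : Claim_equal_parse_stdout_py := by
  intro stdout _ _
  unfold Spec_parse_stdout_py parse_stdout_py parse_stdout_py_alt
  have h := pv_inv (PySem.Str.splitlines stdout) [] false [] []
    (by simp) (by simp [pvSel, PySem.List.enumerate])
  simp only at h ⊢
  rw [h]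
  unfold pvSel
  rfl
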